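-- pv_equiv track=rewrite | github.com/S0jer/algorithms-and-data-structures-course-2021 | Powtórka/36. KP_Z02_T01_2021.py | breaking
-- ===== SOURCE A (Python) =====
-- from math import inf
--
-- def breaking(G):
--     n = len(G)
--     b_count = [0] * n
--     arct, bridges = DFS_Arcticulation(G)
--
--     for i in range(len(bridges)):
--         b_count[bridges[i][0]] += 1
--         b_count[bridges[i][1]] += 1
--
--     cnt, result = -1, -1
--     for j in range(n):
--         if arct[j] is True and b_count[j] > cnt:
--             cnt = b_count[j]
--             result = j
--
--     if result != -1:
--         return result
--
--     return None
--
-- def DFS_Arcticulation(G):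
--     n = len(G)
--     v, low, numbers, arct, v_p, bridges = [-1] * n, [inf] * n, [inf] * n, [False] * n, [-1] * n, []
--     num = 0
--
--     for i in range(n):
--         if v[i] == -1:
--             low, numbers, v_p, v, num, arct = DFSV_Arct(G, i, v, v_p, low, numbers, num, arct)
--
--     for i in range(n):
--         if low[i] == numbers[i] and v_p[i] != -1:
--             bridges.append((v_p[i], i))
--
--     return arct, bridges
--
-- def DFSV_Arct(G, u, v, v_p, low, numbers, num, arct):
--     n = len(G)
--     v[u], numbers[u], low[u] = 1, num, num
--     num += 1
--     children = 0
--
--     for i in range(n):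
--         if v[i] != 1 and G[u][i] == 1:
--             children += 1
--
--             v_p[i] = u
--             low, numbers, v_p, v, num, arct = DFSV_Arct(G, i, v, v_p, low, numbers, num, arct)
--
--             low[u] = min(low[u], low[i])
--
--             if v_p[u] == -1 and children > 1:
--                 arct[u] = True
--
--             if v_p[u] != -1 and low[i] >= numbers[u]:
--                 arct[u] = True
--
--         elif i != v_p[u] and G[u][i] == 1:
--             low[u] = min(low[u], numbers[i])
--
--     return low, numbers, v_p, v, num, arct
-- ===== SOURCE B (Python) =====
-- from math import inf
--
-- def breaking(G):
--     n = len(G)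
--     v, vp = [-1] * n, [-1] * n
--     low, nums = [inf] * n, [inf] * n
--     arct = [False] * n
--     num = 0
--
--     # iterative DFS with an explicit stack of [node, tree-children-so-far, next-neighbour-index] frames
--     for r in range(n):
--         if v[r] == -1:
--             v[r], nums[r], low[r] = 1, num, num
--             num += 1
--             stack = [[r, 0, 0]]
--             while stack:
--                 u, c, i = stack[-1]
--                 if i < n:
--                     if v[i] != 1 and G[u][i] == 1:
--                         vp[i] = u
--                         v[i], nums[i], low[i] = 1, num, num
--                         num += 1
--                         stack[-1][1] = c + 1
--                         stack.append([i, 0, 0])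
--                     elif i != vp[u] and G[u][i] == 1:
--                         low[u] = min(low[u], nums[i])
--                         stack[-1][2] = i + 1
--                     else:
--                         stack[-1][2] = i + 1
--                 else:
--                     stack.pop()
--                     if stack:
--                         p, cp, j = stack[-1]
--                         low[p] = min(low[p], low[u])
--                         if vp[p] == -1 and cp > 1:
--                             arct[p] = True
--                         if vp[p] != -1 and low[u] >= nums[p]:
--                             arct[p] = True
--                         stack[-1][2] = j + 1
--
--     # count bridge incidences directly, no intermediate bridge list
--     bcount = [0] * n
--     for i in range(n):
--         if low[i] == nums[i] and vp[i] != -1: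
--             bcount[vp[i]] += 1
--             bcount[i] += 1
--
--     best = None
--     for j in range(n):
--         if arct[j] and (best is None or bcount[j] > bcount[best]):
--             best = j
--     return best
-- ===== Notes on version B (the rewrite author's own statement) =====
-- stated objective: alternative
-- what changed: The recursive articulation-point DFS is replaced by an iterative DFS over an explicit stack of (node, child-count, next-neighbour-index) frames, and the intermediate bridge list plus strict-greater selection loop are replaced by direct incidence counting and a first-max scan over an Option best.
import Mathlib
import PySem

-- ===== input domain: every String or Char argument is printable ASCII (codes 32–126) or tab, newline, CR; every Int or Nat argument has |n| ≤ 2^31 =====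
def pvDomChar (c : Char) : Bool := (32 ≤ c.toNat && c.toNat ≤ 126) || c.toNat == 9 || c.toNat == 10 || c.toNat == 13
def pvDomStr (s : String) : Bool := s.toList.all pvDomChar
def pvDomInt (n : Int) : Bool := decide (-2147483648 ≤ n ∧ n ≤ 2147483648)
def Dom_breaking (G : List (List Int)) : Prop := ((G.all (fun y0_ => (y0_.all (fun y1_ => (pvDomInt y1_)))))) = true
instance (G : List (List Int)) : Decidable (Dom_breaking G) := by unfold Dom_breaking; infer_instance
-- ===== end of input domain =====

-- ===== PORT A =====
-- B re-implements the recursive articulation-point DFS as an iterative DFS over an explicit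
-- stack of (node, child-count, next-index) frames, counting bridge incidences directly
-- (objective: alternative; same O(n^2) cost).
-- Shared state record and helpers (used by both ports; lists indexed with getD, exact under Pre_).

structure PvSt where
  v : List Int
  vp : List Int
  low : List Int
  nums : List Int
  arct : List Bool
  num : Int
deriving Repr, DecidableEq

def pvBig : Int := 10 ^ 18

def getI (xs : List Int) (i : Nat) : Int := xs.getD i 0
def getB (xs : List Bool) (i : Nat) : Bool := xs.getD i false

def pvEnter (u : Nat) (s : PvSt) : PvSt :=
  { s with v := s.v.set u 1, nums := s.nums.set u s.num,
           low := s.low.set u s.num, num := s.num + 1 }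

def pvInitSt (n : Nat) : PvSt :=
  ⟨List.replicate n (-1), List.replicate n (-1), List.replicate n pvBig,
   List.replicate n pvBig, List.replicate n false, 0⟩

mutual
def pvDfsvA (G : List (List Int)) : Nat → Nat → PvSt → PvSt
  | 0, _, s => s
  | f+1, u, s => (pvScanA G f u 0 (pvEnter u s) 0).1
termination_by f u s => (G.length + 2) * f
decreasing_by all_goals (simp_wf; first | omega | (simp only [Nat.mul_succ]; omega) | nlinarith | (ring_nf; omega))

def pvScanA (G : List (List Int)) : Nat → Nat → Nat → PvSt → Nat → PvSt × Nat
  | f, u, i, s, c =>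
    if i < G.length then
      let sc :=
        if getI s.v i ≠ 1 ∧ getI (G.getD u []) i = 1 then
          let s1 := { s with vp := s.vp.set i (u : Int) }
          let t := pvDfsvA G f i s1
          let t2 := { t with low := t.low.set u (min (getI t.low u) (getI t.low i)) }
          let t3 := if getI t2.vp u = -1 ∧ c + 1 > 1 then { t2 with arct := t2.arct.set u true } else t2
          let t4 := if getI t3.vp u ≠ -1 ∧ getI t3.low i ≥ getI t3.nums u then { t3 with arct := t3.arct.set u true } else t3
          (t4, c + 1)
        else if (i : Int) ≠ getI s.vp u ∧ getI (G.getD u []) i = 1 then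
          ({ s with low := s.low.set u (min (getI s.low u) (getI s.nums i)) }, c)
        else (s, c)
      pvScanA G f u (i+1) sc.1 sc.2
    else (s, c)
termination_by f u i s c => (G.length + 2) * f + 1 + (G.length - i)
decreasing_by all_goals (simp_wf; omega)
end

def pvDfsArctA (G : List (List Int)) : List Bool × List (Int × Int) :=
  let n := G.length
  let s := (List.range n).foldl (fun s i => if getI s.v i = -1 then pvDfsvA G n i s else s) (pvInitSt n)
  let bridges := (List.range n).foldl
      (fun b i => if getI s.low i = getI s.nums i ∧ getI s.vp i ≠ -1
                  then b ++ [(getI s.vp i, (i : Int))] else b) []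
  (s.arct, bridges)

def breaking (G : List (List Int)) : Option Int :=
  let n := G.length
  let ab := pvDfsArctA G
  let bc := ab.2.foldl (fun bc e =>
      let bc1 := bc.set e.1.toNat (getI bc e.1.toNat + 1)
      bc1.set e.2.toNat (getI bc1 e.2.toNat + 1)) (List.replicate n (0 : Int))
  let cr := (List.range n).foldl (fun (p : Int × Int) j =>
      if getB ab.1 j = true ∧ getI bc j > p.1 then (getI bc j, (j : Int)) else p) (-1, -1)
  if cr.2 ≠ -1 then some cr.2 else none

def pvMach (G : List (List Int)) : Nat → List (Nat × Nat × Nat) → PvSt → PvSt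
  | 0, _, s => s
  | _+1, [], s => s
  | f+1, (u, c, i) :: rest, s =>
    if i < G.length then
      if getI s.v i ≠ 1 ∧ getI (G.getD u []) i = 1 then
        pvMach G f ((i, 0, 0) :: (u, c+1, i) :: rest) (pvEnter i { s with vp := s.vp.set i (u : Int) })
      else if (i : Int) ≠ getI s.vp u ∧ getI (G.getD u []) i = 1 then
        pvMach G f ((u, c, i+1) :: rest) { s with low := s.low.set u (min (getI s.low u) (getI s.nums i)) }
      else pvMach G f ((u, c, i+1) :: rest) s
    else
      match rest with
      | [] => s
      | (p, cp, j) :: rest' =>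
        let s1 := { s with low := s.low.set p (min (getI s.low p) (getI s.low u)) }
        let s2 := if getI s1.vp p = -1 ∧ cp > 1 then { s1 with arct := s1.arct.set p true } else s1
        let s3 := if getI s2.vp p ≠ -1 ∧ getI s2.low u ≥ getI s2.nums p then { s2 with arct := s2.arct.set p true } else s2
        pvMach G f ((p, cp, j+1) :: rest') s3

def breaking_alt (G : List (List Int)) : Option Int :=
  let n := G.length
  let s := (List.range n).foldl (fun s r =>
      if getI s.v r = -1 then pvMach G ((n+2)*(n+2)) [(r, 0, 0)] (pvEnter r s) else s) (pvInitSt n)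
  let bc := (List.range n).foldl (fun bc i =>
      if getI s.low i = getI s.nums i ∧ getI s.vp i ≠ -1 then
        let bc1 := bc.set (getI s.vp i).toNat (getI bc (getI s.vp i).toNat + 1)
        bc1.set i (getI bc1 i + 1)
      else bc) (List.replicate n (0 : Int))
  let best := (List.range n).foldl (fun (b : Option Nat) j =>
      if getB s.arct j = true then
        match b with
        | none => some j
        | some bb => if getI bc j > getI bc bb then some j else b
      else b) none
  best.map (fun j => (j : Int))

-- ===== PRECONDITION & SPEC =====
-- Pre_: Python A indexes G[u][i] for all u, i < len(G), so it raises IndexError unless every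
-- row has length ≥ len(G); exactly those inputs are excluded (B raises there too).
def Pre_breaking (G : List (List Int)) : Prop := ∀ row ∈ G, G.length ≤ row.length
instance (G : List (List Int)) : Decidable (Pre_breaking G) := by unfold Pre_breaking; infer_instance

def pvWitness_breaking : List (List Int) := [[0, 1], [1, 0]]

def Spec_breaking (G : List (List Int)) (out : Option Int) : Prop := out = breaking_alt G
instance (G : List (List Int)) (out : Option Int) : Decidable (Spec_breaking G out) := by unfold Spec_breaking; infer_instance

-- ===== CLAIM (what is proved, stated in full; the proofs are below) =====
def Claim_equal_breaking : Prop := ∀ (G : List (List Int)), Dom_breaking G → Pre_breaking G → Spec_breaking G (breaking G)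

-- ===== LEMMAS AND PROOFS =====

-- the post-child update (shared shape of A's after-recursion block and the machine's pop)
def pvPost (p ch cp : Nat) (t : PvSt) : PvSt :=
  let t2 := { t with low := t.low.set p (min (getI t.low p) (getI t.low ch)) }
  let t3 := if getI t2.vp p = -1 ∧ cp > 1 then { t2 with arct := t2.arct.set p true } else t2
  if getI t3.vp p ≠ -1 ∧ getI t3.low ch ≥ getI t3.nums p then { t3 with arct := t3.arct.set p true } else t3

theorem pvPost_v (p ch cp : Nat) (t : PvSt) : (pvPost p ch cp t).v = t.v := by
  unfold pvPost; dsimp only; split_ifs <;> rfl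

-- Optionful mirror of A's recursive DFS: `none` exactly when the fuel guard would fire.
mutual
def pvDfsvAO (G : List (List Int)) : Nat → Nat → PvSt → Option (PvSt × Nat)
  | 0, _, _ => none
  | f+1, u, s => pvScanAO G f u 0 (pvEnter u s) 0
termination_by f u s => (G.length + 2) * f
decreasing_by all_goals (simp_wf; first | omega | (simp only [Nat.mul_succ]; omega) | nlinarith | (ring_nf; omega))

def pvScanAO (G : List (List Int)) : Nat → Nat → Nat → PvSt → Nat → Option (PvSt × Nat)
  | f, u, i, s, c =>
    if i < G.length then
      if getI s.v i ≠ 1 ∧ getI (G.getD u []) i = 1 then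
        let s1 := { s with vp := s.vp.set i (u : Int) }
        match pvDfsvAO G f i s1 with
        | none => none
        | some tc => pvScanAO G f u (i+1) (pvPost u i (c+1) tc.1) (c+1)
      else if (i : Int) ≠ getI s.vp u ∧ getI (G.getD u []) i = 1 then
        pvScanAO G f u (i+1) { s with low := s.low.set u (min (getI s.low u) (getI s.nums i)) } c
      else pvScanAO G f u (i+1) s c
    else some (s, c)
termination_by f u i s c => (G.length + 2) * f + 1 + (G.length - i)
decreasing_by all_goals (simp_wf; omega)
end

-- Optionful mirror of the machine: `none` exactly when the fuel guard would fire.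
def pvMachO (G : List (List Int)) : Nat → List (Nat × Nat × Nat) → PvSt → Option PvSt
  | 0, _, _ => none
  | _+1, [], s => some s
  | f+1, (u, c, i) :: rest, s =>
    if i < G.length then
      if getI s.v i ≠ 1 ∧ getI (G.getD u []) i = 1 then
        pvMachO G f ((i, 0, 0) :: (u, c+1, i) :: rest) (pvEnter i { s with vp := s.vp.set i (u : Int) })
      else if (i : Int) ≠ getI s.vp u ∧ getI (G.getD u []) i = 1 then
        pvMachO G f ((u, c, i+1) :: rest) { s with low := s.low.set u (min (getI s.low u) (getI s.nums i)) }
      else pvMachO G f ((u, c, i+1) :: rest) s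
    else
      match rest with
      | [] => some s
      | (p, cp, j) :: rest' => pvMachO G f ((p, cp, j+1) :: rest') (pvPost p u cp s)

def pvMachTo (G : List (List Int)) (st : List (Nat × Nat × Nat)) (s : PvSt) (r : PvSt) : Prop :=
  ∃ f, pvMachO G f st s = some r

def pvUnvis (n : Nat) (s : PvSt) : Nat := (List.range n).countP (fun j => getI s.v j ≠ 1)

def pvMu (n : Nat) (st : List (Nat × Nat × Nat)) (s : PvSt) : Nat :=
  pvUnvis n s * (n + 3) + (st.map (fun fr => n + 1 - fr.2.2)).sum + st.length

-- basic getD/set facts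
theorem getI_set (xs : List Int) (i j : Nat) (x : Int) :
    getI (xs.set i x) j = if i = j ∧ i < xs.length then x else getI xs j := by
  rcases Decidable.em (i = j ∧ i < xs.length) with h | h
  · obtain ⟨rfl, h2⟩ := h
    simp [getI, List.getD, h2]
  · rw [if_neg h]
    by_cases hij : i = j
    · subst hij
      have h2 : ¬ i < xs.length := fun hc => h ⟨rfl, hc⟩
      simp [getI, List.getD, h2]
    · simp [getI, List.getD, hij]

theorem pv_countP_update (l : List Nat) (i : Nat) (p q : Nat → Bool) (hi : i ∈ l) (hd : l.Nodup)
    (h1 : ∀ j ∈ l, j ≠ i → q j = p j) (hpi : p i = true) (hqi : q i = false) :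
    l.countP q + 1 = l.countP p := by
  induction l with
  | nil => cases hi
  | cons a t ih =>
    by_cases hai : a = i
    · subst hai
      have hnotin : a ∉ t := (List.nodup_cons.mp hd).1
      have hq : t.countP q = t.countP p := by
        refine List.countP_congr ?_
        intro x hx
        rw [h1 x (List.mem_cons_of_mem _ hx) (fun hxa => hnotin (hxa ▸ hx))]
      rw [List.countP_cons, List.countP_cons, hpi, hqi, hq]
      simp
    · have hat : i ∈ t := by
        rcases List.mem_cons.mp hi with h' | h'
        · exact absurd h'.symm hai
        · exact h'
      have ha : q a = p a := h1 a List.mem_cons_self hai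
      rw [List.countP_cons, List.countP_cons, ha]
      have := ih hat (List.nodup_cons.mp hd).2 (fun j hj hji => h1 j (List.mem_cons_of_mem _ hj) hji)
      omega

theorem pvUnvis_enter (n i : Nat) (s : PvSt) (hin : i < n) (hlen : i < s.v.length)
    (hv : getI s.v i ≠ 1) : pvUnvis n (pvEnter i s) + 1 = pvUnvis n s := by
  unfold pvUnvis
  refine pv_countP_update (List.range n) i _ _ (List.mem_range.mpr hin) (List.nodup_range) ?_ ?_ ?_
  · intro j _ hji
    simp [pvEnter, getI_set, Ne.symm hji]
  · simpa using hv
  · simp [pvEnter, getI_set, hlen]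

theorem pvUnvis_le (n : Nat) (s : PvSt) : pvUnvis n s ≤ n := by
  unfold pvUnvis
  calc (List.range n).countP (fun j => getI s.v j ≠ 1) ≤ (List.range n).length :=
        List.countP_le_length
    _ = n := List.length_range

theorem pvUnvis_pos (n i : Nat) (s : PvSt) (hin : i < n) (hv : getI s.v i ≠ 1) :
    1 ≤ pvUnvis n s := by
  have : 0 < (List.range n).countP (fun j => getI s.v j ≠ 1) :=
    List.countP_pos_iff.mpr ⟨i, List.mem_range.mpr hin, by simpa using hv⟩
  simpa [pvUnvis] using this

theorem pvUnvis_mono (n : Nat) (s t : PvSt) (h : ∀ j, getI s.v j = 1 → getI t.v j = 1) :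
    pvUnvis n t ≤ pvUnvis n s := by
  refine List.countP_mono_left ?_
  intro j _ hj
  simp only [decide_eq_true_eq] at *
  intro hc
  exact hj (h j hc)

theorem getI_enter_keep (u j : Nat) (s : PvSt) (h : getI s.v j = 1) :
    getI (pvEnter u s).v j = 1 := by
  simp only [pvEnter]
  rw [getI_set]
  split_ifs <;> simp_all

-- preservation: A's DFS only ever sets v-entries to 1 and keeps v's length
mutual
theorem pv_pres_dfsv (G : List (List Int)) (f u : Nat) (s : PvSt) (tc : PvSt × Nat)
    (h : pvDfsvAO G f u s = some tc) :
    ((∀ j, getI s.v j = 1 → getI tc.1.v j = 1) ∧ tc.1.v.length = s.v.length) := by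
  cases f with
  | zero => simp [pvDfsvAO] at h
  | succ f =>
    rw [pvDfsvAO] at h
    have hs := pv_pres_scan G f u 0 (pvEnter u s) 0 tc h
    constructor
    · intro j hj
      exact hs.1 j (getI_enter_keep u j s hj)
    · rw [hs.2]
      simp [pvEnter]
termination_by (G.length + 2) * f
decreasing_by all_goals (simp_wf; first | omega | (simp only [Nat.mul_succ]; omega) | nlinarith | (ring_nf; omega))

theorem pv_pres_scan (G : List (List Int)) (f u i : Nat) (s : PvSt) (c : Nat) (tc : PvSt × Nat)
    (h : pvScanAO G f u i s c = some tc) :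
    ((∀ j, getI s.v j = 1 → getI tc.1.v j = 1) ∧ tc.1.v.length = s.v.length) := by
  rw [pvScanAO] at h
  by_cases hi : i < G.length
  · rw [if_pos hi] at h
    by_cases h1 : getI s.v i ≠ 1 ∧ getI (G.getD u []) i = 1
    · rw [if_pos h1] at h
      dsimp only at h
      rcases hdf : pvDfsvAO G f i { s with vp := s.vp.set i (u : Int) } with _ | tc0
      · rw [hdf] at h
        simp at h
      · rw [hdf] at h
        simp only [] at h
        have hd := pv_pres_dfsv G f i _ tc0 hdf
        have hs := pv_pres_scan G f u (i+1) _ (c+1) tc h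
        constructor
        · intro j hj
          apply hs.1
          rw [pvPost_v]
          exact hd.1 j hj
        · rw [hs.2, pvPost_v, hd.2]
    · rw [if_neg h1] at h
      by_cases h2 : (i : Int) ≠ getI s.vp u ∧ getI (G.getD u []) i = 1
      · rw [if_pos h2] at h
        have hs := pv_pres_scan G f u (i+1) _ c tc h
        exact hs
      · rw [if_neg h2] at h
        exact pv_pres_scan G f u (i+1) _ c tc h
  · rw [if_neg hi] at h
    cases h
    exact ⟨fun j hj => hj, rfl⟩
termination_by (G.length + 2) * f + 1 + (G.length - i)
decreasing_by all_goals (simp_wf; first | omega | (simp only [Nat.mul_succ]; omega) | nlinarith | (ring_nf; omega))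
end

-- fuel sufficiency for A's DFS
mutual
theorem pv_asuff_dfsv (G : List (List Int)) (f u : Nat) (s : PvSt) (hu : u < G.length)
    (hl : s.v.length = G.length) (hv : getI s.v u ≠ 1) (hf : pvUnvis G.length s ≤ f) :
    (pvDfsvAO G f u s).isSome := by
  cases f with
  | zero =>
    have := pvUnvis_pos G.length u s hu hv
    omega
  | succ f =>
    rw [pvDfsvAO]
    have hE := pvUnvis_enter G.length u s hu (by omega) hv
    refine pv_asuff_scan G f u 0 (pvEnter u s) 0 ?_ ?_
    · simpa [pvEnter] using hl
    · omega
termination_by (G.length + 2) * f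
decreasing_by all_goals (simp_wf; first | omega | (simp only [Nat.mul_succ]; omega) | nlinarith | (ring_nf; omega))

theorem pv_asuff_scan (G : List (List Int)) (f u i : Nat) (s : PvSt) (c : Nat)
    (hl : s.v.length = G.length) (hf : pvUnvis G.length s ≤ f) :
    (pvScanAO G f u i s c).isSome := by
  rw [pvScanAO]
  by_cases hi : i < G.length
  · rw [if_pos hi]
    by_cases h1 : getI s.v i ≠ 1 ∧ getI (G.getD u []) i = 1
    · rw [if_pos h1]
      dsimp only
      have hd : (pvDfsvAO G f i { s with vp := s.vp.set i (u : Int) }).isSome :=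
        pv_asuff_dfsv G f i _ hi hl h1.1 hf
      rcases hdf : pvDfsvAO G f i { s with vp := s.vp.set i (u : Int) } with _ | tc0
      · rw [hdf] at hd; simp at hd
      · have hpres := pv_pres_dfsv G f i _ tc0 hdf
        refine pv_asuff_scan G f u (i+1) (pvPost u i (c+1) tc0.1) (c+1) ?_ ?_
        · have : (pvPost u i (c+1) tc0.1).v.length = tc0.1.v.length := by rw [pvPost_v]
          rw [this, hpres.2]
          exact hl
        · have hm : pvUnvis G.length tc0.1 ≤ pvUnvis G.length s :=
            pvUnvis_mono G.length _ tc0.1 hpres.1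
          have : pvUnvis G.length (pvPost u i (c+1) tc0.1) = pvUnvis G.length tc0.1 := by
            unfold pvUnvis; rw [pvPost_v]
          omega
    · rw [if_neg h1]
      by_cases h2 : (i : Int) ≠ getI s.vp u ∧ getI (G.getD u []) i = 1
      · rw [if_pos h2]
        exact pv_asuff_scan G f u (i+1) _ c hl hf
      · rw [if_neg h2]
        exact pv_asuff_scan G f u (i+1) _ c hl hf
  · rw [if_neg hi]
    simp
termination_by (G.length + 2) * f + 1 + (G.length - i)
decreasing_by all_goals (simp_wf; first | omega | (simp only [Nat.mul_succ]; omega) | nlinarith | (ring_nf; omega))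
end

-- agreement of the ports with their optionful mirrors
mutual
theorem pv_agree_dfsv (G : List (List Int)) (f u : Nat) (s : PvSt) (tc : PvSt × Nat)
    (h : pvDfsvAO G f u s = some tc) : pvDfsvA G f u s = tc.1 := by
  cases f with
  | zero => simp [pvDfsvAO] at h
  | succ f =>
    rw [pvDfsvAO] at h
    rw [pvDfsvA, pv_agree_scan G f u 0 (pvEnter u s) 0 tc h]
termination_by (G.length + 2) * f
decreasing_by all_goals (simp_wf; first | omega | (simp only [Nat.mul_succ]; omega) | nlinarith | (ring_nf; omega))

theorem pv_agree_scan (G : List (List Int)) (f u i : Nat) (s : PvSt) (c : Nat) (tc : PvSt × Nat)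
    (h : pvScanAO G f u i s c = some tc) : pvScanA G f u i s c = tc := by
  rw [pvScanAO] at h
  rw [pvScanA]
  by_cases hi : i < G.length
  · rw [if_pos hi] at h ⊢
    by_cases h1 : getI s.v i ≠ 1 ∧ getI (G.getD u []) i = 1
    · rw [if_pos h1] at h
      dsimp only at h ⊢
      rw [if_pos h1]
      rcases hdf : pvDfsvAO G f i { s with vp := s.vp.set i (u : Int) } with _ | tc0
      · rw [hdf] at h; simp at h
      · rw [hdf] at h
        rw [pv_agree_dfsv G f i _ tc0 hdf]
        exact pv_agree_scan G f u (i+1) (pvPost u i (c+1) tc0.1) (c+1) tc h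
    · rw [if_neg h1] at h
      dsimp only
      rw [if_neg h1]
      by_cases h2 : (i : Int) ≠ getI s.vp u ∧ getI (G.getD u []) i = 1
      · rw [if_pos h2] at h ⊢
        exact pv_agree_scan G f u (i+1) _ c tc h
      · rw [if_neg h2] at h ⊢
        exact pv_agree_scan G f u (i+1) _ c tc h
  · rw [if_neg hi] at h ⊢
    cases h
    rfl
termination_by (G.length + 2) * f + 1 + (G.length - i)
decreasing_by all_goals (simp_wf; first | omega | (simp only [Nat.mul_succ]; omega) | nlinarith | (ring_nf; omega))
end

theorem pv_agree_mach (G : List (List Int)) (f : Nat) (st : List (Nat × Nat × Nat)) (s r : PvSt)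
    (h : pvMachO G f st s = some r) : pvMach G f st s = r := by
  induction f generalizing st s with
  | zero => simp [pvMachO] at h
  | succ f ih =>
    match st with
    | [] =>
      simp only [pvMachO] at h
      cases h
      rfl
    | (u, c, i) :: rest =>
      simp only [pvMachO] at h
      simp only [pvMach]
      by_cases hi : i < G.length
      · rw [if_pos hi] at h ⊢
        by_cases h1 : getI s.v i ≠ 1 ∧ getI (G.getD u []) i = 1
        · rw [if_pos h1] at h ⊢
          exact ih _ _ h
        · rw [if_neg h1] at h ⊢
          by_cases h2 : (i : Int) ≠ getI s.vp u ∧ getI (G.getD u []) i = 1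
          · rw [if_pos h2] at h ⊢
            exact ih _ _ h
          · rw [if_neg h2] at h ⊢
            exact ih _ _ h
      · rw [if_neg hi] at h ⊢
        match rest with
        | [] => cases h; rfl
        | (p, cp, j) :: rest' =>
          dsimp only at h ⊢
          exact ih _ _ h

theorem pv_mono_mach (G : List (List Int)) (f g : Nat) (st : List (Nat × Nat × Nat)) (s r : PvSt)
    (hfg : f ≤ g) (h : pvMachO G f st s = some r) : pvMachO G g st s = some r := by
  induction f generalizing g st s with
  | zero => simp [pvMachO] at h
  | succ f ih =>
    obtain ⟨g', rfl⟩ : ∃ g', g = g' + 1 := ⟨g - 1, by omega⟩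
    have hfg' : f ≤ g' := by omega
    match st with
    | [] =>
      simp only [pvMachO] at h ⊢
      exact h
    | (u, c, i) :: rest =>
      simp only [pvMachO] at h
      simp only [pvMachO]
      by_cases hi : i < G.length
      · rw [if_pos hi] at h ⊢
        by_cases h1 : getI s.v i ≠ 1 ∧ getI (G.getD u []) i = 1
        · rw [if_pos h1] at h ⊢
          exact ih g' _ _ hfg' h
        · rw [if_neg h1] at h ⊢
          by_cases h2 : (i : Int) ≠ getI s.vp u ∧ getI (G.getD u []) i = 1
          · rw [if_pos h2] at h ⊢
            exact ih g' _ _ hfg' h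
          · rw [if_neg h2] at h ⊢
            exact ih g' _ _ hfg' h
      · rw [if_neg hi] at h ⊢
        match rest with
        | [] => exact h
        | (p, cp, j) :: rest' =>
          dsimp only at h ⊢
          exact ih g' _ _ hfg' h

theorem pv_mach_vlen (G : List (List Int)) (f : Nat) (st : List (Nat × Nat × Nat)) (s : PvSt) :
    (pvMach G f st s).v.length = s.v.length := by
  induction f generalizing st s with
  | zero => simp only [pvMach]
  | succ f ih =>
    match st with
    | [] => simp only [pvMach]
    | (u, c, i) :: rest =>
      simp only [pvMach]
      by_cases hi : i < G.length
      · rw [if_pos hi]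
        by_cases h1 : getI s.v i ≠ 1 ∧ getI (G.getD u []) i = 1
        · rw [if_pos h1]
          rw [ih]
          simp [pvEnter]
        · rw [if_neg h1]
          by_cases h2 : (i : Int) ≠ getI s.vp u ∧ getI (G.getD u []) i = 1
          · rw [if_pos h2]
            rw [ih]
          · rw [if_neg h2]
            rw [ih]
      · rw [if_neg hi]
        match rest with
        | [] => rfl
        | (p, cp, j) :: rest' =>
          dsimp only
          rw [ih]
          split_ifs <;> rfl

-- machine fuel sufficiency via the decreasing measure pvMu
theorem pv_msuff (G : List (List Int)) (f : Nat) (st : List (Nat × Nat × Nat)) (s : PvSt)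
    (hl : s.v.length = G.length) (hmu : pvMu G.length st s < f) :
    (pvMachO G f st s).isSome := by
  induction f generalizing st s with
  | zero => omega
  | succ f ih =>
    match st with
    | [] => simp only [pvMachO]; rfl
    | (u, c, i) :: rest =>
      simp only [pvMachO]
      by_cases hi : i < G.length
      · rw [if_pos hi]
        by_cases h1 : getI s.v i ≠ 1 ∧ getI (G.getD u []) i = 1
        · rw [if_pos h1]
          set s1 : PvSt := { s with vp := s.vp.set i (u : Int) } with hs1
          have hE : pvUnvis G.length (pvEnter i s1) + 1 = pvUnvis G.length s1 :=
            pvUnvis_enter G.length i s1 hi (by simpa [hs1] using (hl ▸ hi)) h1.1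
          refine ih _ _ ?_ ?_
          · simp [pvEnter, hs1, hl]
          · have h0 : pvUnvis G.length s1 = pvUnvis G.length s := rfl
            have hmul : pvUnvis G.length s * (G.length + 3)
                = pvUnvis G.length (pvEnter i s1) * (G.length + 3) + (G.length + 3) := by
              rw [← h0, ← hE]; ring
            simp only [pvMu, List.map_cons, List.sum_cons, List.length_cons] at hmu ⊢
            omega
        · rw [if_neg h1]
          by_cases h2 : (i : Int) ≠ getI s.vp u ∧ getI (G.getD u []) i = 1
          · rw [if_pos h2]
            refine ih _ _ hl ?_
            simp only [pvMu, List.map_cons, List.sum_cons, List.length_cons] at hmu ⊢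
            have h0 : pvUnvis G.length { s with low := s.low.set u (min (getI s.low u) (getI s.nums i)) }
                = pvUnvis G.length s := rfl
            rw [h0]
            omega
          · rw [if_neg h2]
            refine ih _ _ hl ?_
            simp only [pvMu, List.map_cons, List.sum_cons, List.length_cons] at hmu ⊢
            omega
      · rw [if_neg hi]
        match rest with
        | [] => rfl
        | (p, cp, j) :: rest' =>
          dsimp only
          refine ih _ _ ?_ ?_
          · rw [pvPost_v]; exact hl
          · have h0 : pvUnvis G.length (pvPost p u cp s) = pvUnvis G.length s := by
              unfold pvUnvis; rw [pvPost_v]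
            have hmul : pvUnvis G.length (pvPost p u cp s) * (G.length + 3)
                = pvUnvis G.length s * (G.length + 3) := by rw [h0]
            simp only [pvMu, List.map_cons, List.sum_cons, List.length_cons] at hmu ⊢
            omega

theorem pv_pop_congr (G : List (List Int)) (f : Nat) (u c i i' : Nat)
    (rest : List (Nat × Nat × Nat)) (s : PvSt) (hi : ¬ i < G.length) (hi' : ¬ i' < G.length) :
    pvMachO G f ((u, c, i) :: rest) s = pvMachO G f ((u, c, i') :: rest) s := by
  cases f with
  | zero => rfl
  | succ f =>
    simp only [pvMachO]
    rw [if_neg hi, if_neg hi']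

-- the simulation: a completed A-scan of u from index i is one stretch of the machine's run
theorem pv_sim (G : List (List Int)) (fa u i : Nat) (s : PvSt) (c : Nat) (s' : PvSt) (c' : Nat)
    (h : pvScanAO G fa u i s c = some (s', c'))
    (rest : List (Nat × Nat × Nat)) (r : PvSt)
    (hm : pvMachTo G ((u, c', G.length) :: rest) s' r) :
    pvMachTo G ((u, c, i) :: rest) s r := by
  rw [pvScanAO] at h
  by_cases hi : i < G.length
  · rw [if_pos hi] at h
    by_cases h1 : getI s.v i ≠ 1 ∧ getI (G.getD u []) i = 1
    · rw [if_pos h1] at h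
      dsimp only at h
      rcases hdf : pvDfsvAO G fa i { s with vp := s.vp.set i (u : Int) } with _ | tc0
      · rw [hdf] at h; simp at h
      · rw [hdf] at h
        have hm2 : pvMachTo G ((u, c+1, i+1) :: rest) (pvPost u i (c+1) tc0.1) r :=
          pv_sim G fa u (i+1) _ (c+1) s' c' h rest r hm
        cases fa with
        | zero => simp [pvDfsvAO] at hdf
        | succ fb =>
          rw [pvDfsvAO] at hdf
          obtain ⟨g, hg⟩ := hm2
          have hm3 : pvMachTo G ((i, tc0.2, G.length) :: (u, c+1, i) :: rest) tc0.1 r := by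
            refine ⟨g+1, ?_⟩
            simp only [pvMachO]
            rw [if_neg (lt_irrefl G.length)]
            exact hg
          have hm4 : pvMachTo G ((i, 0, 0) :: (u, c+1, i) :: rest)
              (pvEnter i { s with vp := s.vp.set i (u : Int) }) r :=
            pv_sim G fb i 0 _ 0 tc0.1 tc0.2 (by exact hdf) _ r hm3
          obtain ⟨g2, hg2⟩ := hm4
          refine ⟨g2+1, ?_⟩
          simp only [pvMachO]
          rw [if_pos hi, if_pos h1]
          exact hg2
    · rw [if_neg h1] at h
      by_cases h2 : (i : Int) ≠ getI s.vp u ∧ getI (G.getD u []) i = 1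
      · rw [if_pos h2] at h
        obtain ⟨g, hg⟩ := pv_sim G fa u (i+1) _ c s' c' h rest r hm
        refine ⟨g+1, ?_⟩
        simp only [pvMachO]
        rw [if_pos hi, if_neg h1, if_pos h2]
        exact hg
      · rw [if_neg h2] at h
        obtain ⟨g, hg⟩ := pv_sim G fa u (i+1) _ c s' c' h rest r hm
        refine ⟨g+1, ?_⟩
        simp only [pvMachO]
        rw [if_pos hi, if_neg h1, if_neg h2]
        exact hg
  · rw [if_neg hi] at h
    have hs' : s = s' := by
      have := h; simp at this; exact this.1
    have hc' : c = c' := by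
      have := h; simp at this; exact this.2
    subst hs'; subst hc'
    obtain ⟨g, hg⟩ := hm
    refine ⟨g, ?_⟩
    rw [pv_pop_congr G g u c i G.length rest s hi (lt_irrefl G.length)]
    exact hg
termination_by (G.length + 2) * fa + 1 + (G.length - i)
decreasing_by all_goals (simp_wf; first | omega | (simp only [Nat.mul_succ]; omega) | nlinarith | (ring_nf; omega))

theorem pv_root (G : List (List Int)) (u : Nat) (s : PvSt) (hu : u < G.length)
    (hl : s.v.length = G.length) (hv : getI s.v u = -1) :
    pvMach G ((G.length + 2) * (G.length + 2)) [(u, 0, 0)] (pvEnter u s) = pvDfsvA G G.length u s := by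
  have hv1 : getI s.v u ≠ 1 := by rw [hv]; decide
  have hd := pv_asuff_dfsv G G.length u s hu hl hv1 (pvUnvis_le G.length s)
  rcases hdfsA : pvDfsvAO G G.length u s with _ | tc0
  · rw [hdfsA] at hd; simp at hd
  · have hA : pvDfsvA G G.length u s = tc0.1 := pv_agree_dfsv G G.length u s tc0 hdfsA
    obtain ⟨m, hm⟩ : ∃ m, G.length = m + 1 := ⟨G.length - 1, by omega⟩
    rw [hm, pvDfsvAO] at hdfsA
    have hm0 : pvMachTo G [(u, tc0.2, G.length)] tc0.1 tc0.1 := by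
      refine ⟨1, ?_⟩
      simp only [pvMachO]
      rw [if_neg (lt_irrefl G.length)]
    have hm1 := pv_sim G m u 0 (pvEnter u s) 0 tc0.1 tc0.2 (by exact hdfsA) [] tc0.1 hm0
    obtain ⟨g, hg⟩ := hm1
    have hE := pvUnvis_enter G.length u s hu (by omega) hv1
    have hU := pvUnvis_le G.length s
    have hb : pvUnvis G.length (pvEnter u s) ≤ m := by omega
    have hmu : pvMu G.length [(u, 0, 0)] (pvEnter u s) < (G.length + 2) * (G.length + 2) := by
      unfold pvMu
      simp only [List.map_cons, List.map_nil, List.sum_cons, List.sum_nil,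
        List.length_cons, List.length_nil]
      have hmul : pvUnvis G.length (pvEnter u s) * (G.length + 3) ≤ m * (G.length + 3) :=
        Nat.mul_le_mul_right _ hb
      have e1 : m * (G.length + 3) = m * m + 4 * m := by rw [hm]; ring
      have e2 : (G.length + 2) * (G.length + 2) = m * m + 6 * m + 9 := by rw [hm]; ring
      omega
    have hsome := pv_msuff G ((G.length + 2) * (G.length + 2)) [(u, 0, 0)] (pvEnter u s)
      (by simp [pvEnter, hl]) hmu
    rcases hM : pvMachO G ((G.length + 2) * (G.length + 2)) [(u, 0, 0)] (pvEnter u s) with _ | r2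
    · rw [hM] at hsome; simp at hsome
    · have h1 := pv_mono_mach G g (g + (G.length + 2) * (G.length + 2)) _ _ _ (by omega) hg
      have h2 := pv_mono_mach G ((G.length + 2) * (G.length + 2))
        (g + (G.length + 2) * (G.length + 2)) _ _ _ (by omega) hM
      have hr : r2 = tc0.1 := by
        rw [h1] at h2
        exact (Option.some.inj h2).symm
      rw [pv_agree_mach G _ _ _ _ hM, hA, hr]

theorem pv_fold_aux (G : List (List Int)) (l : List Nat) (hmem : ∀ i ∈ l, i < G.length) :
    ∀ s : PvSt, s.v.length = G.length →
    l.foldl (fun s i => if getI s.v i = -1 then pvDfsvA G G.length i s else s) s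
    = l.foldl (fun s r => if getI s.v r = -1 then pvMach G ((G.length + 2) * (G.length + 2)) [(r, 0, 0)] (pvEnter r s) else s) s := by
  induction l with
  | nil => intro s _; rfl
  | cons a t ih =>
    intro s hl
    simp only [List.foldl_cons]
    have hmem' : ∀ i ∈ t, i < G.length := fun i hi => hmem i (List.mem_cons_of_mem _ hi)
    by_cases hv : getI s.v a = -1
    · rw [if_pos hv, if_pos hv, ← pv_root G a s (hmem a List.mem_cons_self) hl hv]
      refine ih hmem' _ ?_
      rw [pv_mach_vlen]
      simpa [pvEnter] using hl
    · rw [if_neg hv, if_neg hv]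
      exact ih hmem' s hl

theorem pv_fold_eq (G : List (List Int)) :
    (List.range G.length).foldl (fun s i => if getI s.v i = -1 then pvDfsvA G G.length i s else s) (pvInitSt G.length)
    = (List.range G.length).foldl (fun s r => if getI s.v r = -1 then pvMach G ((G.length + 2) * (G.length + 2)) [(r, 0, 0)] (pvEnter r s) else s) (pvInitSt G.length) := by
  refine pv_fold_aux G (List.range G.length) (fun i hi => List.mem_range.mp hi) _ ?_
  simp [pvInitSt]

-- bridge-list counting = direct counting
theorem pv_bc_eq (s : PvSt) (n : Nat) (l : List Nat) (acc : List (Int × Int)) (bc0 : List Int) :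
    (l.foldl (fun b i => if getI s.low i = getI s.nums i ∧ getI s.vp i ≠ -1
                  then b ++ [(getI s.vp i, (i : Int))] else b) acc).foldl
      (fun bc e => let bc1 := bc.set e.1.toNat (getI bc e.1.toNat + 1)
                   bc1.set e.2.toNat (getI bc1 e.2.toNat + 1)) bc0
    = l.foldl (fun bc i =>
        if getI s.low i = getI s.nums i ∧ getI s.vp i ≠ -1 then
          let bc1 := bc.set (getI s.vp i).toNat (getI bc (getI s.vp i).toNat + 1)
          bc1.set i (getI bc1 i + 1)
        else bc) (acc.foldl (fun bc e => let bc1 := bc.set e.1.toNat (getI bc e.1.toNat + 1)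
                                         bc1.set e.2.toNat (getI bc1 e.2.toNat + 1)) bc0) := by
  induction l generalizing acc with
  | nil => simp
  | cons a t ih =>
    simp only [List.foldl_cons]
    by_cases hc : getI s.low a = getI s.nums a ∧ getI s.vp a ≠ -1
    · rw [if_pos hc, if_pos hc]
      rw [ih]
      congr 1
      simp only [List.foldl_append, List.foldl_cons, List.foldl_nil]
      simp [Int.toNat_natCast]
    · rw [if_neg hc, if_neg hc]
      exact ih acc

theorem pv_bc_nonneg (l : List Nat) (s : PvSt) (bc0 : List Int) (h0 : ∀ k, 0 ≤ getI bc0 k) :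
    ∀ k, 0 ≤ getI (l.foldl (fun bc i =>
        if getI s.low i = getI s.nums i ∧ getI s.vp i ≠ -1 then
          let bc1 := bc.set (getI s.vp i).toNat (getI bc (getI s.vp i).toNat + 1)
          bc1.set i (getI bc1 i + 1)
        else bc) bc0) k := by
  have step : ∀ (xs : List Int) (i : Nat), (∀ k, 0 ≤ getI xs k) →
      ∀ k, 0 ≤ getI (xs.set i (getI xs i + 1)) k := by
    intro xs i hx k
    rw [getI_set]
    split_ifs with h1
    · have := hx i
      omega
    · exact hx k
  induction l generalizing bc0 with
  | nil => exact h0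
  | cons a t ih =>
    simp only [List.foldl_cons]
    by_cases hc : getI s.low a = getI s.nums a ∧ getI s.vp a ≠ -1
    · rw [if_pos hc]
      exact ih _ (fun k => step _ _ (step _ _ h0) k)
    · rw [if_neg hc]
      exact ih _ h0

def pvEnc (bc : List Int) : Option Nat → Int × Int
  | none => (-1, -1)
  | some bb => (getI bc bb, (bb : Int))

theorem pv_sel_eq (ar : List Bool) (bc : List Int) (l : List Nat) (b : Option Nat)
    (hbc : ∀ k, 0 ≤ getI bc k) :
    l.foldl (fun (p : Int × Int) j =>
        if getB ar j = true ∧ getI bc j > p.1 then (getI bc j, (j : Int)) else p) (pvEnc bc b)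
    = pvEnc bc (l.foldl (fun (bo : Option Nat) j =>
        if getB ar j = true then
          match bo with
          | none => some j
          | some bb => if getI bc j > getI bc bb then some j else bo
        else bo) b) := by
  induction l generalizing b with
  | nil => rfl
  | cons a t ih =>
    simp only [List.foldl_cons]
    by_cases ha : getB ar a = true
    · rw [if_pos ha]
      cases b with
      | none =>
        dsimp only
        have hcond : getB ar a = true ∧ getI bc a > (pvEnc bc none).1 := by
          refine ⟨ha, ?_⟩
          have := hbc a
          simp [pvEnc]
          omega
        rw [if_pos hcond]
        exact ih (some a)
      | some bb =>
        dsimp only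
        by_cases hgt : getI bc a > getI bc bb
        · rw [if_pos ⟨ha, by simpa [pvEnc] using hgt⟩, if_pos hgt]
          exact ih (some a)
        · rw [if_neg (by simp [pvEnc]; intro _; omega), if_neg hgt]
          exact ih (some bb)
    · have ha' : ¬ (getB ar a = true ∧ getI bc a > (pvEnc bc b).1) := fun hx => ha hx.1
      rw [if_neg ha', if_neg ha]
      exact ih b

-- ===== VERDICT (by name: the statement is the Claim_ definition above) =====
theorem breaking_spec : Claim_equal_breaking := by
  unfold Claim_equal_breaking
  intro G _ _
  unfold Spec_breaking breaking breaking_alt pvDfsArctA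
  dsimp only
  rw [pv_fold_eq]
  set st := (List.range G.length).foldl
      (fun s r => if getI s.v r = -1 then pvMach G ((G.length + 2) * (G.length + 2)) [(r, 0, 0)] (pvEnter r s) else s)
      (pvInitSt G.length) with hst
  rw [pv_bc_eq st G.length (List.range G.length) [] (List.replicate G.length (0 : Int))]
  simp only [List.foldl_nil]
  set bc := (List.range G.length).foldl
      (fun bc i =>
        if getI st.low i = getI st.nums i ∧ getI st.vp i ≠ -1 then
          let bc1 := bc.set (getI st.vp i).toNat (getI bc (getI st.vp i).toNat + 1)
          bc1.set i (getI bc1 i + 1)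
        else bc) (List.replicate G.length (0 : Int)) with hbcdef
  have hbc : ∀ k, 0 ≤ getI bc k := by
    rw [hbcdef]
    refine pv_bc_nonneg (List.range G.length) st (List.replicate G.length (0 : Int)) ?_
    intro k
    by_cases h : k < G.length
    · simp [getI, List.getD, h]
    · simp [getI, List.getD, h]
  have hsel := pv_sel_eq st.arct bc (List.range G.length) none hbc
  simp only [pvEnc] at hsel
  rw [hsel]
  rcases hbf : (List.range G.length).foldl
      (fun (bo : Option Nat) j =>
        if getB st.arct j = true then
          match bo with
          | none => some j
          | some bb => if getI bc j > getI bc bb then some j else bo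
        else bo) none with _ | bb
  · simp
  · have hne : ((bb : Int)) ≠ -1 := by
      intro hx
      omega
    simp [hne]
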